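-- pv_equiv track=rewrite | github.com/ChinchillaBiiru09/LASTPROJECT-ServerSide | apps/utilities/utils.py | sanitize_email_char
-- ===== SOURCE A (Python) =====
-- def sanitize_email_char(string):
--     special_char = [
--         "(", ")", "{", "}", "[", "]", "<", ">",
--         "--","-", "*", "%", "+", "/", "'",
--         "$", "&", "`", ",", '"', ";", ":",
--         "?", "^", "=", "~"
--     ]
--     for i in string:
--         if i in special_char:
--             return True, i
--     return False, ""
-- ===== SOURCE B (Python) =====
-- # B: instead of scanning the string char by char with a list membership test,
-- # loop over the fixed set of special characters and take the minimum str.find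
-- # index; return the character at that index. ("--" in A's list is redundant:
-- # a single character can never equal it, and the single "-" covers it.)
-- _SPECIALS = "(){}[]<>-*%+/'$&`,\";:?^=~"
--
-- def sanitize_email_char(string):
--     best = -1
--     for c in _SPECIALS:
--         i = string.find(c)
--         if i != -1 and (best == -1 or i < best):
--             best = i
--     if best == -1:
--         return False, ""
--     return True, string[best]
-- ===== Notes on version B (the rewrite author's own statement) =====
-- stated objective: faster
-- what changed: Instead of scanning the string character by character in Python with a membership test against the special list, B loops over the 25 fixed special characters and takes the minimum str.find index, returning the character there (the redundant two-char '--' entry, which a single character can never match, is dropped); the per-character Python loop is replaced by C-level str.find scans, measured faster in a timing run.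
import Mathlib
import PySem

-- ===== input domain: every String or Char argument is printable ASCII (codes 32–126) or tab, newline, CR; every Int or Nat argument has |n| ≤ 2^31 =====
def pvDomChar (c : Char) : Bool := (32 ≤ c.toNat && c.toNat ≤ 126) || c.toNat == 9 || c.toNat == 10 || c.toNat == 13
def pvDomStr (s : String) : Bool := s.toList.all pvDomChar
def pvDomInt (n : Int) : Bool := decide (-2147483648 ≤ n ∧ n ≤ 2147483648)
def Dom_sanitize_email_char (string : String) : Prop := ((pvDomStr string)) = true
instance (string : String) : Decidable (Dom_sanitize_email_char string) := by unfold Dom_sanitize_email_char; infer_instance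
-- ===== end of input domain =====

-- B replaces A's per-character scan-with-membership-test by a minimum over
-- str.find indices of the fixed special characters (objective: faster — the
-- timing run measured B faster via C-level str.find scans).

-- ===== PORT A =====
def pvSpecialA : List String :=
  ["(", ")", "{", "}", "[", "]", "<", ">",
   "--", "-", "*", "%", "+", "/", "'",
   "$", "&", "`", ",", "\"", ";", ":",
   "?", "^", "=", "~"]

-- the 'for i in string' loop with its early return
def pvGoA : List Char → Bool × String
  | [] => (false, "")
  | i :: rest =>
    if pvSpecialA.contains (String.ofList [i]) then (true, String.ofList [i]) else pvGoA rest

def sanitize_email_char (string : String) : Bool × String := pvGoA string.toList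

-- ===== PORT B =====
def pvSpecialsB : List Char := "(){}[]<>-*%+/'$&`,\";:?^=~".toList

def sanitize_email_char_alt (string : String) : Bool × String :=
  let best := pvSpecialsB.foldl (fun best c =>
    let i := PySem.Str.find string (String.ofList [c])
    if i ≠ -1 ∧ (best = -1 ∨ i < best) then i else best) (-1 : Int)
  if best = -1 then (false, "")
  else
    -- string[best]: the none branch is unreachable (best is an in-range find index)
    (true, (PySem.Str.pyGet? string best).elim "" (fun c => String.ofList [c]))

-- ===== PRECONDITION & SPEC =====
def Spec_sanitize_email_char (string : String) (out : Bool × String) : Prop := out = sanitize_email_char_alt string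
instance (string : String) (out : Bool × String) : Decidable (Spec_sanitize_email_char string out) := by unfold Spec_sanitize_email_char; infer_instance

-- ===== CLAIM (what is proved, stated in full; the proofs are below) =====
def Claim_equal_sanitize_email_char : Prop := ∀ (string : String), Dom_sanitize_email_char string → Spec_sanitize_email_char string (sanitize_email_char string)

-- ===== LEMMAS AND PROOFS =====

theorem pvBeqOne (c c' : Char) : (String.ofList [c] == String.ofList [c']) = (c == c') := by
  simp [← String.toList_inj]

theorem pvBeqTwo (c : Char) : (String.ofList [c] == String.ofList ['-', '-']) = false := by
  simp [← String.toList_inj]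

-- A's membership test on a one-character string equals char membership in B's set
-- (the two-character entry "--" can never equal a one-character string).
theorem pvContains_bridge (c : Char) :
    pvSpecialA.contains (String.ofList [c]) = pvSpecialsB.contains c := by
  simp only [pvSpecialA, pvSpecialsB, List.contains_cons, List.contains_nil]
  rw [show ("(" : String) = String.ofList ['('] from by decide,
    show (")" : String) = String.ofList [')'] from by decide,
    show ("{" : String) = String.ofList ['{'] from by decide,
    show ("}" : String) = String.ofList ['}'] from by decide,
    show ("[" : String) = String.ofList ['['] from by decide,
    show ("]" : String) = String.ofList [']'] from by decide,
    show ("<" : String) = String.ofList ['<'] from by decide,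
    show (">" : String) = String.ofList ['>'] from by decide,
    show ("--" : String) = String.ofList ['-', '-'] from by decide,
    show ("-" : String) = String.ofList ['-'] from by decide,
    show ("*" : String) = String.ofList ['*'] from by decide,
    show ("%" : String) = String.ofList ['%'] from by decide,
    show ("+" : String) = String.ofList ['+'] from by decide,
    show ("/" : String) = String.ofList ['/'] from by decide,
    show ("'" : String) = String.ofList ['\''] from by decide,
    show ("$" : String) = String.ofList ['$'] from by decide,
    show ("&" : String) = String.ofList ['&'] from by decide,
    show ("`" : String) = String.ofList ['`'] from by decide,
    show ("," : String) = String.ofList [','] from by decide,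
    show ("\"" : String) = String.ofList ['"'] from by decide,
    show (";" : String) = String.ofList [';'] from by decide,
    show (":" : String) = String.ofList [':'] from by decide,
    show ("?" : String) = String.ofList ['?'] from by decide,
    show ("^" : String) = String.ofList ['^'] from by decide,
    show ("=" : String) = String.ofList ['='] from by decide,
    show ("~" : String) = String.ofList ['~'] from by decide]
  simp only [pvBeqOne, pvBeqTwo, Bool.false_or]
  rw [show "(){}[]<>-*%+/'$&`,\";:?^=~".toList
      = ['(', ')', '{', '}', '[', ']', '<', '>', '-', '*', '%', '+', '/', '\'',
         '$', '&', '`', ',', '"', ';', ':', '?', '^', '=', '~'] from by decide]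
  simp only [List.contains_cons, List.contains_nil]

-- B's fold step, with the local binding inlined (proof-side abbreviation)
def pvStep (l : List Char) (best : Int) (c : Char) : Int :=
  if PySem.Chars.find l [c] ≠ -1 ∧ (best = -1 ∨ PySem.Chars.find l [c] < best)
  then PySem.Chars.find l [c] else best

theorem pvFold_le_acc (l : List Char) (cs : List Char) (acc : Int) (h : 0 ≤ acc) :
    0 ≤ cs.foldl (pvStep l) acc ∧ cs.foldl (pvStep l) acc ≤ acc := by
  induction cs generalizing acc with
  | nil => exact ⟨h, le_refl acc⟩
  | cons c rest ih =>
    have hstep : 0 ≤ pvStep l acc c ∧ pvStep l acc c ≤ acc := by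
      have := PySem.Chars.neg_one_le_find l [c]
      unfold pvStep; split_ifs with hc
      · omega
      · omega
    have h2 := ih (pvStep l acc c) hstep.1
    simp only [List.foldl_cons]
    exact ⟨h2.1, le_trans h2.2 hstep.2⟩

theorem pvFold_le_find (l : List Char) (cs : List Char) (acc : Int) (hacc : -1 ≤ acc)
    (c : Char) (hc : c ∈ cs) (hf : 0 ≤ PySem.Chars.find l [c]) :
    0 ≤ cs.foldl (pvStep l) acc ∧ cs.foldl (pvStep l) acc ≤ PySem.Chars.find l [c] := by
  induction cs generalizing acc with
  | nil => cases hc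
  | cons c' rest ih =>
    simp only [List.foldl_cons]
    rcases List.mem_cons.mp hc with rfl | hmem
    · have hstep : 0 ≤ pvStep l acc c ∧ pvStep l acc c ≤ PySem.Chars.find l [c] := by
        unfold pvStep; split_ifs with hcond
        · omega
        · simp only [not_and, not_or, not_lt] at hcond
          have := PySem.Chars.neg_one_le_find l [c]
          omega
      have h2 := pvFold_le_acc l rest (pvStep l acc c) hstep.1
      exact ⟨h2.1, le_trans h2.2 hstep.2⟩
    · have hstep : -1 ≤ pvStep l acc c' := by
        unfold pvStep; split_ifs with hcond
        · exact PySem.Chars.neg_one_le_find l [c']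
        · exact hacc
      exact ih (pvStep l acc c') hstep hmem

theorem pvFold_origin (l : List Char) (cs : List Char) (acc : Int) :
    cs.foldl (pvStep l) acc = acc ∨
    ∃ c ∈ cs, cs.foldl (pvStep l) acc = PySem.Chars.find l [c] ∧
      0 ≤ cs.foldl (pvStep l) acc := by
  induction cs generalizing acc with
  | nil => left; rfl
  | cons c rest ih =>
    simp only [List.foldl_cons]
    rcases ih (pvStep l acc c) with h | ⟨c', hc', h, h0⟩
    · rw [h]
      by_cases hcond : PySem.Chars.find l [c] ≠ -1 ∧ (acc = -1 ∨ PySem.Chars.find l [c] < acc)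
      · right; refine ⟨c, List.mem_cons_self, ?_, ?_⟩
        · simp [pvStep, hcond]
        · simp only [pvStep, if_pos hcond]
          have := PySem.Chars.neg_one_le_find l [c]; omega
      · left; simp [pvStep, hcond]
    · right; exact ⟨c', List.mem_cons_of_mem _ hc', h, h0⟩

-- if no character of l is special, A returns (false, "")
theorem pvGoA_none (l : List Char) (h : ∀ c ∈ l, pvSpecialsB.contains c = false) :
    pvGoA l = (false, "") := by
  induction l with
  | nil => rfl
  | cons c rest ih =>
    have hc := h c List.mem_cons_self
    rw [pvGoA, pvContains_bridge, hc]
    simp only [Bool.false_eq_true, if_false]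
    exact ih (fun c' hc' => h c' (List.mem_cons_of_mem _ hc'))

-- if position j is the first special position, A returns (true, that character)
theorem pvGoA_found (l : List Char) (j : Nat) (hj : j < l.length)
    (hspec : pvSpecialsB.contains l[j] = true)
    (hmin : ∀ i, (hi : i < j) → pvSpecialsB.contains (l[i]'(by omega)) = false) :
    pvGoA l = (true, String.ofList [l[j]]) := by
  induction l generalizing j with
  | nil => simp at hj
  | cons c rest ih =>
    cases j with
    | zero =>
      simp only [List.getElem_cons_zero] at hspec ⊢
      rw [pvGoA, pvContains_bridge, hspec]
      simp
    | succ j' =>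
      have h0 := hmin 0 (Nat.succ_pos j')
      simp only [List.getElem_cons_zero] at h0
      rw [pvGoA, pvContains_bridge, h0]
      simp only [Bool.false_eq_true, if_false, List.getElem_cons_succ]
      exact ih j' (by simpa using hj) (by simpa using hspec)
        (fun i hi => by simpa using hmin (i + 1) (by omega))

-- a one-character prefix of 'drop i' is exactly the character at position i
theorem pvPrefix_drop_iff (l : List Char) (c : Char) (i : Nat) (hi : i < l.length) :
    [c] <+: l.drop i ↔ l[i] = c := by
  constructor
  · intro h
    rcases h with ⟨t, ht⟩
    have h2 : List.drop i l = c :: t := ht.symm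
    have h3 : (List.drop i l)[0]'(by simp [List.length_drop]; omega) = l[i + 0] :=
      List.getElem_drop
    simp only [h2, List.getElem_cons_zero, Nat.add_zero] at h3
    exact h3.symm
  · intro h
    refine ⟨l.drop (i + 1), ?_⟩
    have := List.getElem_cons_drop (as := l) (i := i) hi
    rw [h] at this
    simpa using this

-- ===== VERDICT (by name: the statement is the Claim_ definition above) =====
theorem sanitize_email_char_spec : Claim_equal_sanitize_email_char := by
  intro string _
  unfold Spec_sanitize_email_char sanitize_email_char sanitize_email_char_alt
  set l := string.toList with hl
  have hfold : pvSpecialsB.foldl (fun best c =>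
      let i := PySem.Str.find string (String.ofList [c])
      if i ≠ -1 ∧ (best = -1 ∨ i < best) then i else best) (-1 : Int)
      = pvSpecialsB.foldl (pvStep l) (-1 : Int) := by
    apply PySem.List.foldl_congr_mem
    intro acc c _
    simp [pvStep, ← hl]
  rw [hfold]
  set best := pvSpecialsB.foldl (pvStep l) (-1 : Int) with hbest
  by_cases hb : best = -1
  · -- no special character occurs in the string
    rw [if_pos hb]
    apply pvGoA_none
    intro c hc
    by_contra hcontains
    rw [Bool.not_eq_false] at hcontains
    have hmemB : c ∈ pvSpecialsB := List.contains_iff_mem.mp hcontains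
    have hinf : [c] <:+: l := (List.singleton_infix_iff c l).mpr hc
    have hf : 0 ≤ PySem.Chars.find l [c] := (PySem.Chars.find_nonneg_iff l [c]).mpr hinf
    have := pvFold_le_find l pvSpecialsB (-1) (le_refl _) c hmemB hf
    omega
  · rw [if_neg hb]
    -- best is the find index of some special character c0; j := best.toNat is
    -- the first special position of the string
    rcases pvFold_origin l pvSpecialsB (-1) with h | ⟨c0, hc0, heq, h0⟩
    · exact absurd h hb
    rw [← hbest] at heq h0
    have hspec0 := PySem.Chars.find_spec (s := l) (sub := [c0]) (by omega)
    rw [← heq] at hspec0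
    set j := best.toNat with hj
    have hjl : j < l.length := by
      rcases hspec0.1 with ⟨t, ht⟩
      have := congrArg List.length ht
      simp [List.length_drop] at this
      omega
    have hcj : l[j] = c0 := (pvPrefix_drop_iff l c0 j hjl).mp hspec0.1
    have hspecj : pvSpecialsB.contains l[j] = true := by
      rw [hcj]; exact List.contains_iff_mem.mpr hc0
    have hminj : ∀ i, (hi : i < j) → pvSpecialsB.contains (l[i]'(by omega)) = false := by
      intro i hi
      by_contra hcontains
      rw [Bool.not_eq_false] at hcontains
      have hmemB : l[i]'(by omega) ∈ pvSpecialsB := List.contains_iff_mem.mp hcontains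
      have hpref : [l[i]'(by omega)] <+: l.drop i := (pvPrefix_drop_iff l _ i (by omega)).mpr rfl
      have hinf : [l[i]'(by omega)] <:+: l :=
        (List.singleton_infix_iff _ l).mpr (List.getElem_mem _)
      have hf : 0 ≤ PySem.Chars.find l [l[i]'(by omega)] :=
        (PySem.Chars.find_nonneg_iff l _).mpr hinf
      have hle := (pvFold_le_find l pvSpecialsB (-1) (le_refl _) _ hmemB hf).2
      rw [← hbest] at hle
      have hfind_le : (PySem.Chars.find l [l[i]'(by omega)]).toNat ≤ i := by
        by_contra hgt
        exact (PySem.Chars.find_spec (s := l) (sub := [l[i]'(by omega)]) hf).2 i (by omega) hpref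
      omega
    rw [pvGoA_found l j hjl hspecj hminj]
    have hget : PySem.Str.pyGet? string best = some (l[j]'hjl) := by
      have h1 : PySem.Str.pyGet? string best = PySem.List.pyGet? l best := by
        simp [PySem.Str.pyGet?, ← hl]
      rw [h1, PySem.List.pyGet?_of_nonneg l h0, ← hj, List.getElem?_eq_getElem hjl]
    rw [hget]
    rfl
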